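-- pv_equiv track=rewrite | github.com/cry999/AtCoder | beginner/006/C.py | sphinx
-- ===== SOURCE A (Python) =====
-- def sphinx(N: int, M: int)->tuple:
--     # x, y, z をそれぞれ大人、老人、赤ん坊の人数とする
--     # x + y + z = N
--     # 2x + 3y + 4z = M
--     # となり、これから z を消去することで、
--     # 2x + y = 4N - M
--     # となる。これはベズーの等式。
--     # これが解を持つ条件は 4N - M が GCD(2, 1)=1
--     # の倍数であること。
--
--     # y が係数 1 なので探索しやすい
--     for y in range(0, N+1):
--         if (4*N-M-y) & 1 != 0:
--             continue
--         if (4*N-M-y) < 0: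
--             continue
--
--         x = (4*N-M-y)//2
--         z = N - x - y
--         if z < 0 or N < z:
--             continue
--
--         return x, y, z
--
--     return -1, -1, -1
-- ===== SOURCE B (Python) =====
-- def sphinx(N: int, M: int) -> tuple:
--     # Closed form: eliminating z gives 2x + y = 4N - M =: K.  The loop's first
--     # hit is the smallest y >= 0 with y ≡ K (mod 2), i.e. y = K % 2, provided
--     # y <= N (in range), y <= K (x >= 0) and y <= 2N - K (z >= 0).
--     K = 4 * N - M
--     y = K % 2
--     if y <= N and y <= K and y <= 2 * N - K:
--         x = (K - y) // 2
--         return x, y, N - x - y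
--     return -1, -1, -1
-- ===== Notes on version B (the rewrite author's own statement) =====
-- stated objective: faster
-- what changed: Replaced A's linear search over y in range(0, N+1) by a closed-form solution: the first feasible y is K % 2 (K = 4N - M), checked against three inequalities, with x and z computed directly.
import Mathlib
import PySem

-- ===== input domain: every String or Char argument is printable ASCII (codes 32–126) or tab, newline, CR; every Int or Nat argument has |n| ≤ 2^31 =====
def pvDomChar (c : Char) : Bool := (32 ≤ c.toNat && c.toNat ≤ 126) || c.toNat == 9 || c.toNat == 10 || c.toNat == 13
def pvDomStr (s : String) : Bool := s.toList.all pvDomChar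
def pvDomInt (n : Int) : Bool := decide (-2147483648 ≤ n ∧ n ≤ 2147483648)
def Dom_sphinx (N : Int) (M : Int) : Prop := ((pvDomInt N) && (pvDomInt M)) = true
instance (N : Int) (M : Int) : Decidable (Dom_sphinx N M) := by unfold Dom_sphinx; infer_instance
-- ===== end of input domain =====

-- B replaces A's O(N) search loop by an O(1) closed form: the first feasible y is K % 2 (K = 4N - M).

-- ===== PORT A =====
-- loop body of `for y in range(0, N+1)` with early return; `(…) & 1 != 0` is
-- ported as `mod … 2 ≠ 0` (exact: Python's n & 1 equals n % 2 for every int n).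
def sphinxGo (N M : Int) : List Int → List Int
  | [] => [-1, -1, -1]
  | y :: ys =>
    if PySem.Int.mod (4*N - M - y) 2 ≠ 0 then sphinxGo N M ys
    else if (4*N - M - y) < 0 then sphinxGo N M ys
    else
      let x := PySem.Int.floordiv (4*N - M - y) 2
      let z := N - x - y
      if z < 0 ∨ N < z then sphinxGo N M ys
      else [x, y, z]

def sphinx (N : Int) (M : Int) : List Int :=
  sphinxGo N M (PySem.List.pyRange 0 (N+1) 1)

-- ===== PORT B =====
def sphinx_alt (N : Int) (M : Int) : List Int :=
  let K := 4*N - M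
  let y := PySem.Int.mod K 2
  if y ≤ N ∧ y ≤ K ∧ y ≤ 2*N - K then
    let x := PySem.Int.floordiv (K - y) 2
    [x, y, N - x - y]
  else [-1, -1, -1]

-- ===== PRECONDITION & SPEC =====
def Spec_sphinx (N : Int) (M : Int) (out : List Int) : Prop := out = sphinx_alt N M
instance (N : Int) (M : Int) (out : List Int) : Decidable (Spec_sphinx N M out) := by unfold Spec_sphinx; infer_instance

-- ===== CLAIM (what is proved, stated in full; the proofs are below) =====
def Claim_equal_sphinx : Prop := ∀ (N : Int) (M : Int), Dom_sphinx N M → Spec_sphinx N M (sphinx N M)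

-- ===== LEMMAS AND PROOFS =====

theorem pv_mod2 (a : Int) : PySem.Int.mod a 2 = a % 2 :=
  PySem.Int.mod_eq_emod_of_pos (by norm_num)

theorem pv_div2 (a : Int) : PySem.Int.floordiv a 2 = a / 2 :=
  PySem.Int.floordiv_eq_ediv_of_pos (by norm_num)

-- the loop body succeeds at y
def Ok (N M y : Int) : Prop :=
  (4*N - M - y) % 2 = 0 ∧ 0 ≤ 4*N - M - y ∧
  ¬(N - (4*N - M - y)/2 - y < 0 ∨ N < N - (4*N - M - y)/2 - y)

theorem go_fail (N M : Int) (l : List Int) (h : ∀ y ∈ l, ¬ Ok N M y) :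
    sphinxGo N M l = [-1, -1, -1] := by
  induction l with
  | nil => rfl
  | cons y ys ih =>
    have hy : ¬ Ok N M y := h y (by simp)
    have hys : ∀ z ∈ ys, ¬ Ok N M z := fun z hz => h z (List.mem_cons_of_mem _ hz)
    simp only [sphinxGo, pv_mod2, pv_div2]
    split_ifs with h1 h2 h3
    · exact ih hys
    · exact ih hys
    · exact ih hys
    · exact absurd ⟨by omega, by omega, h3⟩ hy

theorem sphinx_eq (N M : Int) : sphinx N M = sphinx_alt N M := by
  unfold sphinx sphinx_alt
  simp only [pv_mod2, pv_div2]
  have hK2 := Int.emod_two_eq (4*N - M)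
  by_cases hc : (4*N - M) % 2 ≤ N ∧ (4*N - M) % 2 ≤ 4*N - M ∧ (4*N - M) % 2 ≤ 2*N - (4*N - M)
  · rw [if_pos hc]
    rcases hK2 with h0 | h1
    · -- y = 0 succeeds immediately
      rw [PySem.List.pyRange_one_cons (by omega : (0:Int) < N + 1)]
      simp only [sphinxGo, pv_mod2, pv_div2]
      rw [if_neg (by omega), if_neg (by omega), if_neg (by omega)]
      simp only [List.cons.injEq, and_true]
      exact ⟨by omega, by omega, by omega⟩
    · -- y = 0 fails parity, y = 1 succeeds
      rw [PySem.List.pyRange_one_cons (by omega : (0:Int) < N + 1)]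
      rw [PySem.List.pyRange_one_cons (by omega : (0:Int) + 1 < N + 1)]
      simp only [sphinxGo, pv_mod2, pv_div2]
      rw [if_pos (by omega), if_neg (by omega), if_neg (by omega), if_neg (by omega)]
      simp only [List.cons.injEq, and_true]
      exact ⟨by omega, by omega, by omega⟩
  · rw [if_neg hc]
    refine go_fail N M _ (fun y hy => ?_)
    have hyr := (PySem.List.mem_pyRange_one).mp hy
    rintro ⟨p1, p2, p3⟩
    omega

-- ===== VERDICT (by name: the statement is the Claim_ definition above) =====
theorem sphinx_spec : Claim_equal_sphinx := by
  intro N M _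
  exact sphinx_eq N M
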